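-- pv_equiv track=rewrite | github.com/arponbasu/SURP_QCResearchProject_2ndSem | Intermediates/SingleFactorized.py | generateEinsumString
-- ===== SOURCE A (Python) =====
-- def generateEinsumString (indlist):
--   retval = ','.join(indlist)
--   retval = retval + '->'
--   String = ''.join(indlist)
--   rhs = ''
--   for i in String:
--     count = 0
--     for j in String:
--         if i == j:
--             count += 1
--         if count > 1:
--             break
--     if count == 1:
--         rhs += i
--   rhs = ''.join(sorted(rhs))
--   retval += rhs
--
--   return str(retval)
-- ===== SOURCE B (Python) =====
-- def generateEinsumString(indlist):
--     retval = ','.join(indlist) + '->'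
--     chars = sorted(''.join(indlist))
--     rhs = []
--     i = 0
--     n = len(chars)
--     while i < n:
--         j = i
--         while j < n and chars[j] == chars[i]:
--             j += 1
--         if j - i == 1:
--             rhs.append(chars[i])
--         i = j
--     return retval + ''.join(rhs)
-- ===== Notes on version B (the rewrite author's own statement) =====
-- stated objective: faster
-- what changed: Replaces A's nested count loop over the concatenated string (scan the whole string again for every character) by sorting the characters once and a single run-length scan over the sorted sequence that keeps exactly the runs of length 1, already in sorted order.
import Mathlib
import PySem

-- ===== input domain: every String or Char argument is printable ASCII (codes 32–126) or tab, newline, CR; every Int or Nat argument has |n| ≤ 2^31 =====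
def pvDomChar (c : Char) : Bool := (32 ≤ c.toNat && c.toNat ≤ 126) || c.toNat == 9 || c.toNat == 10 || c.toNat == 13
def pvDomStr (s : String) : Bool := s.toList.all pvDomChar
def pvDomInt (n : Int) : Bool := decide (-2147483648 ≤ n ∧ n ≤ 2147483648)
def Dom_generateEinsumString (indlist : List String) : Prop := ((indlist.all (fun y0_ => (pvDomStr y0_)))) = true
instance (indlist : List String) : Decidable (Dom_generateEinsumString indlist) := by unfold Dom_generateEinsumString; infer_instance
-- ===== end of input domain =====

-- B replaces A's quadratic nested count loop by sorting the concatenated characters once and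
-- keeping the length-1 runs in a single scan (objective: faster; measured).


-- ===== PORT A =====
-- the inner 'for j in String' loop: count occurrences of i in the string, breaking once count > 1
def pvInnerA (i : Char) : List Char → Nat → Nat
  | [], count => count
  | j :: rest, count =>
    let count := if i == j then count + 1 else count
    if count > 1 then count else pvInnerA i rest count

def generateEinsumString (indlist : List String) : String :=
  let retval := PySem.Chars.join [','] (indlist.map String.toList)
  let retval := retval ++ ['-', '>']
  let S := PySem.Chars.join [] (indlist.map String.toList)
  let rhs := S.foldl (fun rhs i => if pvInnerA i S 0 = 1 then rhs ++ [i] else rhs) ([] : List Char)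
  let rhs := PySem.List.sorted rhs (fun x => x) false
  String.ofList (retval ++ rhs)

-- ===== PORT B =====
-- the while loop of Source B: walk the sorted characters, skip each run, keep the runs of length 1
def pvRunsB : List Char → List Char
  | [] => []
  | c :: rest =>
    let run := rest.takeWhile (· == c)
    let tail := rest.dropWhile (· == c)
    (if run = [] then [c] else []) ++ pvRunsB tail
termination_by l => l.length
decreasing_by
  simp only [List.length_cons]
  exact Nat.lt_succ_of_le (List.length_dropWhile_le _ _)

def generateEinsumString_alt (indlist : List String) : String :=
  let retval := PySem.Chars.join [','] (indlist.map String.toList) ++ ['-', '>']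
  let chars := PySem.List.sorted (PySem.Chars.join [] (indlist.map String.toList)) (fun x => x) false
  String.ofList (retval ++ pvRunsB chars)

-- ===== PRECONDITION & SPEC =====
def Spec_generateEinsumString (indlist : List String) (out : String) : Prop := out = generateEinsumString_alt indlist
instance (indlist : List String) (out : String) : Decidable (Spec_generateEinsumString indlist out) := by unfold Spec_generateEinsumString; infer_instance

-- ===== CLAIM (what is proved, stated in full; the proofs are below) =====
def Claim_equal_generateEinsumString : Prop := ∀ (indlist : List String), Dom_generateEinsumString indlist → Spec_generateEinsumString indlist (generateEinsumString indlist)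

-- ===== LEMMAS AND PROOFS =====

-- A's inner loop started at count c ≤ 1 computes min (c + occurrences) 2
theorem pvInnerA_eq (i : Char) (s : List Char) :
    ∀ c, c ≤ 1 → pvInnerA i s c = min (c + s.count i) 2 := by
  induction s with
  | nil => intro c hc; simp [pvInnerA]; omega
  | cons j rest ih =>
    intro c hc
    by_cases h : i = j
    · subst h
      rw [List.count_cons_self]
      interval_cases c
      · have : pvInnerA i (i :: rest) 0 = pvInnerA i rest 1 := by simp [pvInnerA]
        rw [this, ih 1 (le_refl 1)]; omega
      · have : pvInnerA i (i :: rest) 1 = 2 := by simp [pvInnerA]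
        rw [this]; omega
    · have hb : (i == j) = false := by simpa using h
      have : pvInnerA i (j :: rest) c = pvInnerA i rest c := by
        simp [pvInnerA, hb]; omega
      rw [this, List.count_cons_of_ne (fun hh => h hh.symm), ih c hc]

-- so 'count == 1' after the inner loop means multiplicity exactly 1
theorem pvInnerA_one_iff (i : Char) (s : List Char) :
    pvInnerA i s 0 = 1 ↔ s.count i = 1 := by
  rw [pvInnerA_eq i s 0 (by omega)]; omega

-- in a sorted list, everything past the dropped run of c differs from c
theorem count_tail_zero (c : Char) (rest : List Char)
    (hp : rest.Pairwise (· ≤ ·)) (hle : ∀ x ∈ rest, c ≤ x) :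
    ∀ x ∈ rest.dropWhile (· == c), x ≠ c := by
  intro x hx hxc
  rcases hd : rest.dropWhile (· == c) with _ | ⟨h, t⟩
  · rw [hd] at hx; simp at hx
  · have hmem : ∀ y ∈ rest.dropWhile (· == c), y ∈ rest := fun y hy =>
      (List.dropWhile_sublist _).mem hy
    have hhx : (h == c) = false := by
      have := List.head?_dropWhile_not (· == c) rest
      rw [hd] at this; simpa using this
    have hhc : h ≠ c := by simpa using hhx
    have hch : c ≤ h := hle h (hmem h (by rw [hd]; simp))
    rw [hd] at hx
    rcases List.mem_cons.mp hx with hx1 | hx1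
    · exact hhc (hxc ▸ hx1 ▸ rfl)
    · have hsorted : (rest.dropWhile (· == c)).Pairwise (· ≤ ·) :=
        List.Pairwise.sublist (List.dropWhile_sublist _) hp
      rw [hd] at hsorted
      have : h ≤ x := (List.pairwise_cons.mp hsorted).1 x hx1
      exact hhc (le_antisymm (hxc ▸ this) hch)

-- B's run scan over a sorted list keeps exactly the characters of multiplicity 1
theorem pvRunsB_eq_filter (t : List Char) (hp : t.Pairwise (· ≤ ·)) :
    pvRunsB t = t.filter (fun x => t.count x == 1) := by
  induction t using pvRunsB.induct with
  | case1 => simp [pvRunsB]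
  | case2 c rest tl ih =>
    set run := rest.takeWhile (· == c) with hrun
    have hsplit : run ++ tl = rest := List.takeWhile_append_dropWhile
    have hrest : rest.Pairwise (· ≤ ·) := (List.pairwise_cons.mp hp).2
    have hle : ∀ x ∈ rest, c ≤ x := (List.pairwise_cons.mp hp).1
    have htail : tl.Pairwise (· ≤ ·) := List.Pairwise.sublist (List.dropWhile_sublist _) hrest
    have htailne : ∀ x ∈ tl, x ≠ c := count_tail_zero c rest hrest hle
    have hrunc : ∀ x ∈ run, x = c := fun x hx => by simpa using List.mem_takeWhile_imp hx
    have htail0 : tl.count c = 0 := List.count_eq_zero.mpr (fun h => htailne c h rfl)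
    have hrunlen : run.count c = run.length := List.count_eq_length.mpr (fun x hx => by
      simpa [eq_comm] using hrunc x hx)
    have hcount : (c :: rest).count c = 1 + run.length := by
      rw [List.count_cons_self, ← hsplit, List.count_append, htail0, hrunlen]; omega
    have hcount_tail : ∀ x ∈ tl, (c :: rest).count x = tl.count x := by
      intro x hx
      have hxc : x ≠ c := htailne x hx
      have hrun0 : run.count x = 0 := List.count_eq_zero.mpr (fun h => hxc (hrunc x h))
      rw [← hsplit, List.count_cons_of_ne (fun h => hxc h.symm), List.count_append, hrun0]
      omega
    have hfilter_tail :
        tl.filter (fun x => (c :: rest).count x == 1) =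
        tl.filter (fun x => tl.count x == 1) :=
      List.filter_congr (fun x hx => by simp [hcount_tail x hx])
    have hrw : pvRunsB (c :: rest) = (if run = [] then [c] else []) ++ pvRunsB tl := by
      rw [pvRunsB]
    have hrest_split : rest.filter (fun x => (c :: rest).count x == 1) =
        run.filter (fun x => (c :: rest).count x == 1) ++
        tl.filter (fun x => (c :: rest).count x == 1) := by
      conv_lhs => rw [← hsplit]
      rw [List.filter_append, hsplit]
    rw [hrw, ih htail, List.filter_cons, hrest_split]
    by_cases hre : run = []
    · have hc1 : ((c :: rest).count c == 1) = true := by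
        rw [hcount, hre]; simp
      rw [hc1, hre]
      simp only [List.filter_nil, List.nil_append]
      rw [hfilter_tail]
      rfl
    · have hlen : 1 ≤ run.length := List.length_pos_iff.mpr hre
      have hc2 : ((c :: rest).count c == 1) = false := by
        rw [hcount]; simp; omega
      have hfilter_run : run.filter (fun x => (c :: rest).count x == 1) = [] := by
        rw [List.filter_eq_nil_iff]
        intro x hx
        rw [hrunc x hx, hc2]; simp
      rw [hc2, hfilter_run, hfilter_tail]
      simp [hre]

-- sorting commutes with filtering by a per-character predicate
theorem sorted_filter_comm (s : List Char) (q : Char → Bool) :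
    PySem.List.sorted (s.filter q) (fun x => x) false =
    (PySem.List.sorted s (fun x => x) false).filter q := by
  apply PySem.List.sorted_id_eq_of_perm_of_pairwise
  · exact (PySem.List.sorted_perm s (fun x => x) false).filter q
  · exact (PySem.List.sorted_pairwise s (fun x => x)).filter q

-- ===== VERDICT (by name: the statement is the Claim_ definition above) =====
theorem generateEinsumString_spec : Claim_equal_generateEinsumString := by
  intro indlist _
  unfold Spec_generateEinsumString generateEinsumString generateEinsumString_alt
  simp only
  set S := PySem.Chars.join [] (indlist.map String.toList) with hS
  congr 2
  -- A's accumulation loop is a filter by 'multiplicity 1'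
  have hfun : (fun (rhs : List Char) i => if pvInnerA i S 0 = 1 then rhs ++ [i] else rhs)
      = (fun (rhs : List Char) i => if (fun j => S.count j == 1) i = true then rhs ++ [id i] else rhs) := by
    funext rhs i
    by_cases hcase : S.count i = 1 <;> simp [pvInnerA_one_iff, hcase]
  rw [hfun, PySem.List.foldl_append_if (fun j => S.count j == 1) id S [], List.map_id, List.nil_append]
  -- sort after filtering = filter after sorting, counts unchanged by the sort
  rw [sorted_filter_comm, pvRunsB_eq_filter _ (PySem.List.sorted_pairwise S (fun x => x))]
  exact List.filter_congr (fun x _ => by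
    rw [(PySem.List.sorted_perm S (fun x => x) false).count_eq])
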